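-- pv_equiv track=rewrite | github.com/DooHongKm/Algorithm_Solutions | 프로그래머스/2/17683. ［3차］ 방금그곡/［3차］ 방금그곡.py | transform
-- ===== SOURCE A (Python) =====
-- def transform(string):
--     result = ""
--     for i in range(1, len(string)):
--         if string[i] == "#":
--             result += string[i - 1].lower()
--         else:
--             result += string[i - 1]
--     if string[-1] != "#":
--         result += string[-1]
--     return result.replace("#", "")
-- ===== SOURCE B (Python) =====
-- def transform(string):
--     out = []
--     i = 0
--     n = len(string)
--     while i < n:
--         if i + 1 < n and string[i + 1] == '#':
--             out.append(string[i].lower())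
--             i += 2
--         else:
--             out.append(string[i])
--             i += 1
--     return ''.join(c for c in out if c != '#')
-- ===== Notes on version B (the rewrite author's own statement) =====
-- stated objective: alternative
-- what changed: A loops over indices 1..len-1 emitting the PREVIOUS character (lowered when the current one is '#'), handles the last character separately, and strips '#' in a final replace pass; B is a single forward two-character scan that consumes a note together with its following '#' in one step and then filters out remaining '#'s.
import Mathlib
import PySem

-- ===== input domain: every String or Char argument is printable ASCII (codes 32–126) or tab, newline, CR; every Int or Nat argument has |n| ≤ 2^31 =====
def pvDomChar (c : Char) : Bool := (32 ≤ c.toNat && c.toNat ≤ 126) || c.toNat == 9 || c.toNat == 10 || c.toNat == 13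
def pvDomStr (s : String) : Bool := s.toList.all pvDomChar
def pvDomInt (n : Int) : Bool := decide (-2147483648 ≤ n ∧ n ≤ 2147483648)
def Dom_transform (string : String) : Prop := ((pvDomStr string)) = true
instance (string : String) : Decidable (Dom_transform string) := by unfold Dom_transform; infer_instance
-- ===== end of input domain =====

-- B replaces A's index loop (emit previous char, lowered when the current one is '#',
-- plus a separate last-character step and a final replace pass) by a single forward
-- two-character scan (same cost, different traversal); objective: alternative.

-- ===== PORT A =====
-- literal transliteration of A: fold over range(1, len(string)), then the string[-1] step,
-- then result.replace('#', ''). Indexing uses pyGetD; Pre_ guarantees every access is in range.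
def transform (string : String) : String :=
  let cs := string.toList
  let result : List Char :=
    (PySem.List.pyRange 1 (PySem.List.len cs) 1).foldl
      (fun acc i =>
        if PySem.List.pyGetD cs i ' ' == '#' then
          acc ++ [PySem.Chars.lowerChar (PySem.List.pyGetD cs (i - 1) ' ')]
        else
          acc ++ [PySem.List.pyGetD cs (i - 1) ' '])
      []
  let result :=
    if PySem.List.pyGetD cs (-1) ' ' != '#' then result ++ [PySem.List.pyGetD cs (-1) ' ']
    else result
  String.ofList (PySem.Chars.replace result ['#'] [])

-- ===== PORT B =====
-- B's while loop: consume two characters when the second is '#', else one.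
def pvScanB : List Char → List Char
  | c1 :: c2 :: rest =>
      if c2 == '#' then PySem.Chars.lowerChar c1 :: pvScanB rest
      else c1 :: pvScanB (c2 :: rest)
  | [c] => [c]
  | [] => []

def transform_alt (string : String) : String :=
  String.ofList ((pvScanB string.toList).filter (fun c => c != '#'))

-- ===== PRECONDITION & SPEC =====
-- Pre_ excludes only the empty string, on which A raises IndexError at string[-1]; B returns '' there.
def Pre_transform (string : String) : Prop := string.toList ≠ []
instance (string : String) : Decidable (Pre_transform string) := by unfold Pre_transform; infer_instance
def pvWitness_transform : String := "CC#BCC#BCC#BC"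

def Spec_transform (string : String) (out : String) : Prop := out = transform_alt string
instance (string : String) (out : String) : Decidable (Spec_transform string out) := by unfold Spec_transform; infer_instance

-- ===== CLAIM (what is proved, stated in full; the proofs are below) =====
def Claim_equal_transform : Prop := ∀ (string : String), Dom_transform string → Pre_transform string → Spec_transform string (transform string)

-- ===== LEMMAS AND PROOFS =====

-- A's per-position rule, written structurally: emit each character, lowered when the
-- NEXT character is '#'; the last character is emitted unconditionally (it is '#'-filtered later).
def pvPmap : List Char → List Char
  | c1 :: c2 :: rest =>
      (if c2 == '#' then PySem.Chars.lowerChar c1 else c1) :: pvPmap (c2 :: rest)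
  | [c] => [c]
  | [] => []

theorem pvReplaceGo_filter :
    ∀ (fuel : Nat) (l acc : List Char), l.length ≤ fuel →
      PySem.Chars.replace.go ['#'] [] fuel l acc
        = acc.reverse ++ l.filter (fun c => c != '#') := by
  intro fuel
  induction fuel with
  | zero =>
    intro l acc h
    have : l = [] := List.eq_nil_of_length_eq_zero (Nat.le_zero.mp h)
    subst this; simp [PySem.Chars.replace.go]
  | succ n ih =>
    intro l acc h
    cases l with
    | nil => simp [PySem.Chars.replace.go]
    | cons c t =>
      simp only [PySem.Chars.replace.go]
      by_cases hc : c = '#'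
      · subst hc
        have hpre : (['#'] : List Char).isPrefixOf ('#' :: t) = true := by
          simp [List.isPrefixOf]
        rw [if_pos hpre]
        have hdrop : List.drop (['#'] : List Char).length ('#' :: t) = t := rfl
        rw [hdrop]
        simp only [List.reverse_nil, List.nil_append]
        rw [ih t acc (by simpa using Nat.le_of_succ_le_succ h)]
        simp
      · have hpre : (['#'] : List Char).isPrefixOf (c :: t) = false := by
          simp [List.isPrefixOf, Ne.symm hc]
        rw [if_neg (by simp [hpre])]
        rw [ih t (c :: acc) (by simpa using Nat.le_of_succ_le_succ h)]
        simp [hc]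

theorem pvReplace_filter (l : List Char) :
    PySem.Chars.replace l ['#'] [] = l.filter (fun c => c != '#') := by
  simp only [PySem.Chars.replace, List.isEmpty]
  rw [pvReplaceGo_filter]
  · simp
  · exact Nat.le_refl _

theorem pvLowerChar_hash : PySem.Chars.lowerChar '#' = '#' := by decide

-- pvPmap decomposed: the indexed body part plus the (unconditional) last character.
theorem pvPmap_eq_map_range :
    ∀ (c : Char) (t : List Char),
      pvPmap (c :: t)
        = (List.range t.length).map
            (fun (k : Nat) =>
              if PySem.List.pyGetD (c :: t) ((k : Int) + 1) ' ' == '#'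
              then PySem.Chars.lowerChar (PySem.List.pyGetD (c :: t) (k : Int) ' ')
              else PySem.List.pyGetD (c :: t) (k : Int) ' ')
          ++ [(c :: t).getLast (by simp)] := by
  intro c t
  induction t generalizing c with
  | nil => simp [pvPmap]
  | cons c2 rest ih =>
    simp only [pvPmap, List.length_cons, List.range_succ_eq_map, List.map_cons, List.map_map]
    rw [ih c2]
    have h0 : PySem.List.pyGetD (c :: c2 :: rest) (((0 : Nat) : Int) + 1) ' ' = c2 := by
      rw [show (((0 : Nat) : Int) + 1) = ((1 : Nat) : Int) by norm_num,
        PySem.List.pyGetD_natCast]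
      rfl
    have h0' : PySem.List.pyGetD (c :: c2 :: rest) ((0 : Nat) : Int) ' ' = c := by
      rw [PySem.List.pyGetD_natCast]
      rfl
    have hshift : ∀ k : Nat,
        PySem.List.pyGetD (c :: c2 :: rest) ((k : Int) + 1) ' '
          = PySem.List.pyGetD (c2 :: rest) ((k : Int)) ' ' := by
      intro k
      rw [show ((k : Int) + 1) = (((k + 1 : Nat)) : Int) by push_cast; ring,
        PySem.List.pyGetD_natCast, PySem.List.pyGetD_natCast]
      simp
    have hlast : (c :: c2 :: rest).getLast (by simp) = (c2 :: rest).getLast (by simp) := by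
      simp [List.getLast_cons]
    rw [hlast]
    congr 1
    · simp only [h0, h0']
    · congr 1
      apply List.map_congr_left
      intro k _
      have e1 := hshift (k + 1)
      have e2 := hshift k
      push_cast at e1
      simp only [Function.comp, Nat.succ_eq_add_one, Nat.cast_add, Nat.cast_one]
      rw [e1, e2]

-- filtering '#' out of pvPmap equals filtering it out of B's scan
theorem pvPmap_filter_eq_scan :
    ∀ l : List Char,
      (pvPmap l).filter (fun c => c != '#') = (pvScanB l).filter (fun c => c != '#') := by
  intro l
  induction l using pvScanB.induct with
  | case1 c1 c2 rest h ih =>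
    -- c2 == '#'
    have hc2 : c2 = '#' := by simpa using h
    subst hc2
    have htail : (pvPmap ('#' :: rest)).filter (fun c => c != '#')
        = (pvPmap rest).filter (fun c => c != '#') := by
      cases rest with
      | nil => simp [pvPmap]
      | cons r rs =>
        simp only [pvPmap, List.filter_cons]
        by_cases hr : r = '#'
        · subst hr; simp [pvLowerChar_hash]
        · simp [hr]
    rw [show pvPmap (c1 :: '#' :: rest) = PySem.Chars.lowerChar c1 :: pvPmap ('#' :: rest) from by
      simp [pvPmap]]
    rw [show pvScanB (c1 :: '#' :: rest) = PySem.Chars.lowerChar c1 :: pvScanB rest from by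
      simp [pvScanB]]
    simp only [List.filter_cons]
    rw [htail, ih]
  | case2 c1 c2 rest h ih =>
    have hc2 : (c2 == '#') = false := by simpa using h
    rw [show pvPmap (c1 :: c2 :: rest) = c1 :: pvPmap (c2 :: rest) from by
      simp [pvPmap, hc2]]
    rw [show pvScanB (c1 :: c2 :: rest) = c1 :: pvScanB (c2 :: rest) from by
      simp [pvScanB, hc2]]
    simp only [List.filter_cons]
    rw [ih]
  | case3 c => rfl
  | case4 => rfl

theorem transform_spec : Claim_equal_transform := by
  intro string _hdom hpre
  unfold Spec_transform transform transform_alt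
  unfold Pre_transform at hpre
  cases hcs : string.toList with
  | nil => exact absurd hcs hpre
  | cons c t =>
    simp only [hcs]
    have hfold :
        (PySem.List.pyRange 1 (PySem.List.len (c :: t)) 1).foldl
          (fun acc i =>
            if PySem.List.pyGetD (c :: t) i ' ' == '#' then
              acc ++ [PySem.Chars.lowerChar (PySem.List.pyGetD (c :: t) (i - 1) ' ')]
            else acc ++ [PySem.List.pyGetD (c :: t) (i - 1) ' ']) []
        = (List.range t.length).map
            (fun (k : Nat) =>
              if PySem.List.pyGetD (c :: t) ((k : Int) + 1) ' ' == '#'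
              then PySem.Chars.lowerChar (PySem.List.pyGetD (c :: t) (k : Int) ' ')
              else PySem.List.pyGetD (c :: t) (k : Int) ' ') := by
      rw [PySem.List.foldl_congr_mem _ _
        (fun acc i =>
          acc ++ [if PySem.List.pyGetD (c :: t) i ' ' == '#'
                  then PySem.Chars.lowerChar (PySem.List.pyGetD (c :: t) (i - 1) ' ')
                  else PySem.List.pyGetD (c :: t) (i - 1) ' ']) _
        (by intro acc x _; dsimp only; split <;> rfl)]
      rw [PySem.List.foldl_append_singleton_eq_map]
      simp only [List.nil_append]
      have hlen : PySem.List.len (c :: t) = ((t.length : Int) + 1) := by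
        simp [PySem.List.len]
      rw [hlen, PySem.List.pyRange_one]
      have htn : ((t.length : Int) + 1 - 1).toNat = t.length := by omega
      rw [htn, List.map_map]
      apply List.map_congr_left
      intro k _
      have h1 : (1 : Int) + (k : Int) = (k : Int) + 1 := by ring
      have h2 : (1 : Int) + (k : Int) - 1 = (k : Int) := by ring
      have h3 : (k : Int) + 1 - 1 = (k : Int) := by ring
      simp only [Function.comp, h1, h3]
    have hlast : PySem.List.pyGetD (c :: t) (-1) ' ' = (c :: t).getLast (by simp) := by
      simp [PySem.List.pyGetD, PySem.List.pyGet?, PySem.List.pyIdx?,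
        List.getLast_eq_getElem]
      rfl
    rw [hfold, pvReplace_filter, ← pvPmap_filter_eq_scan (c :: t), pvPmap_eq_map_range, hlast]
    by_cases hl : (c :: t).getLast (by simp) = '#'
    · rw [hl]
      simp [List.filter_append]
    · have hne : ((c :: t).getLast (by simp) != '#') = true := by simp [hl]
      rw [hne]
      simp
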